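-- pv_equiv track=rewrite | github.com/LarynQi/leetcode | medium/arrangeWords.py | arrangeWords
-- ===== SOURCE A (Python) =====
-- def arrangeWords(text: str) -> str:
--     occurrences = []
--     mapping = {}
--     for s in text.split():
--         curr = len(s)
--         if curr not in mapping:
--             mapping[curr] = len(occurrences)
--             occurrences.append([])
--         lst = occurrences[mapping[curr]]
--         if lst:
--             lst.append(s.lower())
--         else:
--             occurrences[mapping[curr]] = [s.lower()]
--     output = ""
--     count = 0
--     for l in {k: v for k, v in sorted(mapping.items(), key=lambda p: p[0])}:
--         i = mapping[l]
--         if count == 0: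
--             for j in range(len(occurrences[i])):
--                 if j == 0:
--                     output += occurrences[i][0][0].upper() + occurrences[i][0][1:] + " "
--                 else:
--                     output += occurrences[i][j] + " "
--         else:
--             for s in occurrences[i]:
--                 output += s + " "
--         count += 1
--
--     # for i in range(len(occurrences)):
--     #     if i == 0:
--     #         for j in range(len(occurrences[i])):
--     #             if j == 0:
--     #                 output += occurrences[i][0][0].upper() + occurrences[i][0][1:] + " "
--     #             else:
--     #                 output += ocurrences[i][j] + " "
--     #     else:
--     #         for s in occurrences[i]:
--     #             output += s + " "
--     return output[:-1]
-- ===== SOURCE B (Python) =====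
-- def arrangeWords(text: str) -> str:
--     words = sorted((w.lower() for w in text.split()), key=len)
--     if not words:
--         return ""
--     words[0] = words[0][0].upper() + words[0][1:]
--     return " ".join(words)
-- ===== Notes on version B (the rewrite author's own statement) =====
-- stated objective: idiomatic
-- what changed: Replaces A's hand-built length->bucket index table (dict + list-of-lists) and two nested emission loops with a single stable sorted(words, key=len) over the lowercased words plus one ' '.join, capitalizing the first word in place.
import Mathlib
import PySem

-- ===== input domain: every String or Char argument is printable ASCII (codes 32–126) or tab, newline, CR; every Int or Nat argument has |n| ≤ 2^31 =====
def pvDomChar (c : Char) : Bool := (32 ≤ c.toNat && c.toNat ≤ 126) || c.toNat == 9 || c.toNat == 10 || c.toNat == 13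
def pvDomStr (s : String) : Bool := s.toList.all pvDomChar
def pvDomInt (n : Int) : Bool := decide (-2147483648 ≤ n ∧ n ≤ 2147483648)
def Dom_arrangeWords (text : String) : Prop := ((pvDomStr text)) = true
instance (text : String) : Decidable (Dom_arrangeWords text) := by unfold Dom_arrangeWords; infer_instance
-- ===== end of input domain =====

-- B replaces A's hand-built length→bucket table and two nested emission loops with one stable
-- key-sort of the lowercased words plus a single join (objective: idiomatic; not measured faster).

-- ===== PORT A =====
-- Python mutates `occurrences` in place (append / item assignment); here the same updates are the
-- functional `List.set`.  `i.toNat` / the `pyGetD _ _ []` defaults / the `match … | [] => []` in the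
-- capitalisation are exact because every mapping value is a valid nonnegative index and every stored
-- word is nonempty (words produced by split() are nonempty) — Python never raises there.
def arrangeWordsStep (st : List (List (List Char)) × PySem.Dict Int Int) (s : List Char) :
    List (List (List Char)) × PySem.Dict Int Int :=
  let occurrences := st.1
  let mapping := st.2
  let curr : Int := (s.length : Int)
  let om :=
    if mapping.contains curr then (occurrences, mapping)
    else (occurrences ++ [[]], mapping.insert curr (occurrences.length : Int))
  let occurrences := om.1
  let mapping := om.2
  let i := mapping.getD curr 0
  let lst := PySem.List.pyGetD occurrences i []
  if lst ≠ [] then (occurrences.set i.toNat (lst ++ [PySem.Chars.lower s]), mapping)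
  else (occurrences.set i.toNat [PySem.Chars.lower s], mapping)

def arrangeWordsEmit (occurrences : List (List (List Char))) (mapping : PySem.Dict Int Int)
    (acc : List Char × Int) (l : Int) : List Char × Int :=
  let output := acc.1
  let count := acc.2
  let i := mapping.getD l 0
  let occi := PySem.List.pyGetD occurrences i []
  if count == 0 then
    ((PySem.List.pyRange 0 (occi.length : Int)).foldl (fun out j =>
        if j == 0 then
          out ++ ((match PySem.List.pyGetD occi 0 [] with
                   | [] => []
                   | c :: r => PySem.Chars.upperChar c :: r) ++ [' '])
        else out ++ (PySem.List.pyGetD occi j [] ++ [' '])) output,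
     count + 1)
  else
    (occi.foldl (fun out s => out ++ (s ++ [' '])) output, count + 1)

def arrangeWords (text : String) : String :=
  let st := (PySem.Chars.split₀ text.toList).foldl arrangeWordsStep ([], PySem.Dict.empty)
  let occurrences := st.1
  let mapping := st.2
  -- {k: v for k, v in sorted(mapping.items(), key=lambda p: p[0])}, iterated = its keys
  let keysIter := (PySem.Dict.ofList (PySem.List.sorted mapping.items (fun p => p.1))).keys
  let fin := keysIter.foldl (arrangeWordsEmit occurrences mapping) ([], 0)
  String.ofList (PySem.List.slice fin.1 none (some (-1)))   -- output[:-1]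

-- ===== PORT B =====
-- words[0][0].upper() + words[0][1:]   (words from split() are nonempty, so the [] arm is unreachable)
def arrangeWordsAltCap (w : List Char) : List Char :=
  match w with
  | [] => []
  | c :: r => PySem.Chars.upperChar c :: r

def arrangeWords_alt (text : String) : String :=
  let words := PySem.List.sorted ((PySem.Chars.split₀ text.toList).map PySem.Chars.lower)
                 (fun w => (w.length : Int))   -- sorted(…, key=len)
  match words with
  | [] => ""
  | w :: rest => String.ofList (PySem.Chars.join [' '] (arrangeWordsAltCap w :: rest))

-- ===== PRECONDITION & SPEC =====
def Spec_arrangeWords (text : String) (out : String) : Prop := out = arrangeWords_alt text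
instance (text : String) (out : String) : Decidable (Spec_arrangeWords text out) := by unfold Spec_arrangeWords; infer_instance

-- ===== CLAIM (what is proved, stated in full; the proofs are below) =====
def Claim_equal_arrangeWords : Prop := ∀ (text : String), Dom_arrangeWords text → Spec_arrangeWords text (arrangeWords text)

-- ===== LEMMAS AND PROOFS =====

-- the length key (Python's len, as Int)
def pvKey (w : List Char) : Int := (w.length : Int)

-- distinct lengths of the words of p, in first-occurrence order
def pvD (p : List (List Char)) : List Int := PySem.List.dedup (p.map pvKey)

-- the bucket of length L: the lowercased words of p of length L, in order
def pvF (p : List (List Char)) (L : Int) : List (List Char) :=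
  (p.map PySem.Chars.lower).filter (fun w => pvKey w == L)

-- A's occurrences list after its first loop
def pvB (p : List (List Char)) : List (List (List Char)) := (pvD p).map (pvF p)

-- A's mapping after its first loop: each distinct length ↦ its bucket index
def pvPairs (D : List Int) (n : Nat) : List (Int × Int) :=
  match D with
  | [] => []
  | k :: ks => (k, (n : Int)) :: pvPairs ks (n + 1)

def pvM (p : List (List Char)) : PySem.Dict Int Int := PySem.Dict.mk (pvPairs (pvD p) 0)


theorem pv_insertBy_between {α : Type} (key : α → Int) (x : α) (P Q : List α)
    (hP : ∀ a ∈ P, ¬ key x < key a) (hQ : ∀ b ∈ Q, key x < key b) :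
    PySem.List.insertBy (fun a b => decide (key a < key b)) x (P ++ Q) = P ++ x :: Q := by
  induction P with
  | nil =>
    cases Q with
    | nil => rfl
    | cons q Q' =>
      simp only [List.nil_append, PySem.List.insertBy]
      rw [if_pos (by simpa using hQ q (by simp))]
  | cons p P' ih =>
    simp only [List.cons_append, PySem.List.insertBy]
    rw [if_neg (by simpa using hP p (by simp))]
    rw [ih (fun a ha => hP a (by simp [ha]))]

theorem pv_dedup_append (m : List Int) (k : Int) :
    PySem.List.dedup (m ++ [k]) =
      if k ∈ PySem.List.dedup m then PySem.List.dedup m else PySem.List.dedup m ++ [k] := by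
  simp only [PySem.List.dedup, PySem.Set.ofList, List.foldl_append, List.foldl_cons, List.foldl_nil,
    PySem.Set.add]
  split_ifs with h1 h2 h2 <;> first | rfl | (exfalso; revert h1; simp_all)

theorem pv_dropWhile_head_false {α : Type} (p : α → Bool) (l : List α) (b0 : α) (B' : List α)
    (h : l.dropWhile p = b0 :: B') : p b0 = false := by
  induction l with
  | nil => cases h
  | cons a l ih =>
    rw [List.dropWhile_cons] at h
    by_cases hp : p a = true
    · rw [if_pos hp] at h; exact ih h
    · rw [if_neg hp] at h
      cases h
      simpa using hp

theorem pv_SK_lt (D : List Int) (h : D.Nodup) :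
    (PySem.List.sorted D (fun x => x)).Pairwise (· < ·) := by
  have hle := PySem.List.sorted_pairwise D (fun x => x)
  have hnd : (PySem.List.sorted D (fun x => x) : List Int).Nodup :=
    ((PySem.List.sorted_perm D (fun x => x) false).nodup_iff).mpr h
  exact (hle.and hnd).imp (fun h => lt_of_le_of_ne h.1 h.2)

theorem pv_key_of_mem_filter {α : Type} (key : α → Int) (xs : List α) (c : Int) (a : α)
    (ha : a ∈ xs.filter (fun w => key w == c)) : key a = c := by
  have := List.of_mem_filter ha
  simpa using this

theorem pv_sorted_eq_flatMap_groups {α : Type} (xs : List α) (key : α → Int) :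
    PySem.List.sorted xs key =
      (PySem.List.sorted (PySem.List.dedup (xs.map key)) (fun x => x)).flatMap
        (fun k => xs.filter (fun w => key w == k)) := by
  induction xs using List.reverseRecOn with
  | nil => rfl
  | append_singleton xs x ih =>
    have hstep : PySem.List.sorted (xs ++ [x]) key =
        PySem.List.insertBy (fun a b => decide (key a < key b)) x (PySem.List.sorted xs key) := by
      rw [PySem.List.sorted_eq_foldl_insertBy, PySem.List.sorted_eq_foldl_insertBy (xs := xs),
        List.foldl_append, List.foldl_cons, List.foldl_nil]
    have hnd : (PySem.List.dedup (xs.map key)).Nodup := PySem.Set.nodup_ofList _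
    have hSKlt := pv_SK_lt _ hnd
    set SK := PySem.List.sorted (PySem.List.dedup (xs.map key)) (fun x => x) with hSK
    have hmap : (xs ++ [x]).map key = xs.map key ++ [key x] := by simp
    have hfilter : ∀ c : Int, (xs ++ [x]).filter (fun w => key w == c) =
        xs.filter (fun w => key w == c) ++ if key x = c then [x] else [] := by
      intro c; rw [List.filter_append]; congr 1
      by_cases h : key x = c <;> simp [h]
    by_cases hk : key x ∈ PySem.List.dedup (xs.map key)
    · -- existing length class
      have hkSK : key x ∈ SK := (PySem.List.mem_sorted _ _ _ _).mpr hk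
      obtain ⟨A, B, hAB⟩ := List.append_of_mem hkSK
      have hpw : (A ++ key x :: B).Pairwise (· < ·) := hAB ▸ hSKlt
      have hA : ∀ a ∈ A, a < key x := fun a ha =>
        (List.pairwise_append.mp hpw).2.2 a ha (key x) (by simp)
      have hB : ∀ b ∈ B, key x < b :=
        fun b hb => (List.pairwise_cons.mp (List.pairwise_append.mp hpw).2.1).1 b hb
      have hded : PySem.List.dedup ((xs ++ [x]).map key) = PySem.List.dedup (xs.map key) := by
        rw [hmap, pv_dedup_append, if_pos hk]
      rw [hstep, ih, hded, ← hSK, hAB]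
      have hL : (A ++ key x :: B).flatMap (fun k => xs.filter (fun w => key w == k)) =
          (A.flatMap (fun k => xs.filter (fun w => key w == k)) ++
            xs.filter (fun w => key w == key x)) ++
            B.flatMap (fun k => xs.filter (fun w => key w == k)) := by
        simp [List.flatMap_append]
      rw [hL, pv_insertBy_between key x _ _ ?_ ?_]
      · rw [List.flatMap_append, List.flatMap_cons]
        have hAk : ∀ c ∈ A, c ≠ key x := fun c hc => ne_of_lt (hA c hc)
        have hBk : ∀ c ∈ B, c ≠ key x := fun c hc => (ne_of_lt (hB c hc)).symm
        have h1 : A.flatMap (fun k => (xs ++ [x]).filter (fun w => key w == k)) =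
            A.flatMap (fun k => xs.filter (fun w => key w == k)) := by
          refine List.flatMap_congr (fun c hc => ?_)
          rw [hfilter c, if_neg (fun h => hAk c hc h.symm), List.append_nil]
        have h2 : B.flatMap (fun k => (xs ++ [x]).filter (fun w => key w == k)) =
            B.flatMap (fun k => xs.filter (fun w => key w == k)) := by
          refine List.flatMap_congr (fun c hc => ?_)
          rw [hfilter c, if_neg (fun h => hBk c hc h.symm), List.append_nil]
        rw [h1, h2, hfilter (key x), if_pos rfl]
        simp
      · intro a ha
        rcases List.mem_append.mp ha with h | h
        · obtain ⟨c, hc, hac⟩ := List.mem_flatMap.mp h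
          have := pv_key_of_mem_filter key xs c a hac
          have := hA c hc; omega
        · have := pv_key_of_mem_filter key xs (key x) a h; omega
      · intro b hb
        obtain ⟨c, hc, hbc⟩ := List.mem_flatMap.mp hb
        have := pv_key_of_mem_filter key xs c b hbc
        have := hB c hc; omega
    · -- new length class
      have hded : PySem.List.dedup ((xs ++ [x]).map key) =
          PySem.List.dedup (xs.map key) ++ [key x] := by
        rw [hmap, pv_dedup_append, if_neg hk]
      have hkSK : key x ∉ SK := fun h => hk ((PySem.List.mem_sorted _ _ _ _).mp h)
      have hSK' : PySem.List.sorted (PySem.List.dedup ((xs ++ [x]).map key)) (fun x => x) =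
          PySem.List.insertBy (fun a b => decide (a < b)) (key x) SK := by
        rw [hded, PySem.List.sorted_eq_foldl_insertBy, List.foldl_append, List.foldl_cons,
          List.foldl_nil, hSK, PySem.List.sorted_eq_foldl_insertBy]
      set A := SK.takeWhile (fun a => decide (a < key x)) with hAdef
      set B := SK.dropWhile (fun a => decide (a < key x)) with hBdef
      have hABSK : A ++ B = SK := List.takeWhile_append_dropWhile
      have hA : ∀ a ∈ A, a < key x := fun a ha => by simpa using List.mem_takeWhile_imp ha
      have hB : ∀ b ∈ B, key x < b := by
        intro b hb
        have hpw : (A ++ B).Pairwise (· < ·) := hABSK ▸ hSKlt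
        have hBpw := (List.pairwise_append.mp hpw).2.1
        cases hBne : B with
        | nil => rw [hBne] at hb; cases hb
        | cons b0 B' =>
          have hhead : ¬ (b0 < key x) := by
            have := pv_dropWhile_head_false (fun a => decide (a < key x)) SK b0 B'
              (hBdef.symm.trans hBne)
            simpa using this
          have hb0 : key x < b0 := by
            rcases lt_or_eq_of_le (le_of_not_gt hhead) with h | h
            · exact h
            · exact absurd (by rw [← hABSK, hBne, h]; simp : key x ∈ SK) hkSK
          rw [hBne] at hb
          rcases List.mem_cons.mp hb with h | h
          · exact h ▸ hb0
          · rw [hBne] at hBpw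
            exact lt_trans hb0 ((List.pairwise_cons.mp hBpw).1 b h)
      have hSK'' : PySem.List.insertBy (fun a b => decide (a < b)) (key x) SK =
          A ++ key x :: B := by
        rw [← hABSK]
        exact pv_insertBy_between (fun x => x) (key x) A B
          (fun a ha => not_lt_of_gt (hA a ha)) hB
      rw [hstep, ih, hSK', hSK'', ← hABSK, List.flatMap_append]
      have hAk : ∀ c ∈ A, c ≠ key x := fun c hc => ne_of_lt (hA c hc)
      have hBk : ∀ c ∈ B, c ≠ key x := fun c hc => (ne_of_lt (hB c hc)).symm
      have h1 : A.flatMap (fun k => (xs ++ [x]).filter (fun w => key w == k)) =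
          A.flatMap (fun k => xs.filter (fun w => key w == k)) := by
        refine List.flatMap_congr (fun c hc => ?_)
        rw [hfilter c, if_neg (fun h => hAk c hc h.symm), List.append_nil]
      have h2 : B.flatMap (fun k => (xs ++ [x]).filter (fun w => key w == k)) =
          B.flatMap (fun k => xs.filter (fun w => key w == k)) := by
        refine List.flatMap_congr (fun c hc => ?_)
        rw [hfilter c, if_neg (fun h => hBk c hc h.symm), List.append_nil]
      have hkfresh : xs.filter (fun w => key w == key x) = [] := by
        rw [List.filter_eq_nil_iff]
        intro w hw
        simp only [beq_iff_eq]
        intro hwk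
        exact hk (by
          have : key x ∈ xs.map key := by
            rw [← hwk]; exact List.mem_map_of_mem hw
          simpa [PySem.List.dedup] using (PySem.Set.mem_ofList (xs.map key) (key x)).mpr this)
      rw [pv_insertBy_between key x _ _ ?_ ?_]
      · rw [List.flatMap_append, List.flatMap_cons, h1, h2, hfilter (key x), if_pos rfl, hkfresh]
        simp
      · intro a ha
        obtain ⟨c, hc, hac⟩ := List.mem_flatMap.mp ha
        have := pv_key_of_mem_filter key xs c a hac
        have := hA c hc; omega
      · intro b hb
        obtain ⟨c, hc, hbc⟩ := List.mem_flatMap.mp hb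
        have := pv_key_of_mem_filter key xs c b hbc
        have := hB c hc; omega

theorem pv_contains (D : List Int) (n : Nat) (k : Int) :
    (PySem.Dict.mk (pvPairs D n)).contains k = decide (k ∈ D) := by
  induction D generalizing n with
  | nil => simp [pvPairs, PySem.Dict.contains_mk]
  | cons d D ih =>
    have h := ih (n + 1)
    simp only [PySem.Dict.contains_mk] at h ⊢
    simp [pvPairs, List.any_cons, h]
    by_cases hdk : d = k
    · simp [hdk]
    · have h2 : ¬(k = d) := fun h' => hdk h'.symm
      simp [hdk, h2]

theorem pv_getD (D : List Int) (n : Nat) (k : Int) (hnd : D.Nodup) (hk : k ∈ D) :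
    (PySem.Dict.mk (pvPairs D n)).getD k 0 = ((n + D.idxOf k : Nat) : Int) := by
  induction D generalizing n with
  | nil => cases hk
  | cons d D ih =>
    rw [PySem.Dict.getD_eq_get?_getD]
    by_cases hdk : d = k
    · subst hdk
      simp [pvPairs, PySem.Dict.get?_mk_cons]
    · rcases List.mem_cons.mp hk with h | h
      · exact absurd h.symm hdk
      · have hrec := ih (n + 1) (List.Nodup.of_cons hnd) h
        rw [PySem.Dict.getD_eq_get?_getD] at hrec
        simp only [pvPairs, PySem.Dict.get?_mk_cons, beq_iff_eq, if_neg hdk]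
        rw [hrec, List.idxOf_cons_ne (a := k) (b := d) D hdk]
        push_cast
        omega

theorem pv_pairs_append (D : List Int) (k : Int) (n : Nat) :
    pvPairs (D ++ [k]) n = pvPairs D n ++ [(k, ((n + D.length : Nat) : Int))] := by
  induction D generalizing n with
  | nil => simp [pvPairs]
  | cons d D ih =>
    simp only [List.cons_append, pvPairs, ih (n + 1), List.length_cons]
    have h : n + 1 + D.length = n + (D.length + 1) := by omega
    rw [h]

theorem pv_insert_fresh (l : List (Int × Int)) (k v : Int)
    (h : (PySem.Dict.mk l).contains k = false) :
    (PySem.Dict.mk l).insert k v = PySem.Dict.mk (l ++ [(k, v)]) := by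
  apply PySem.Dict.ext
  rw [PySem.Dict.items_insert_of_not_contains _ _ h]

theorem pv_mem_D_iff (p : List (List Char)) (k : Int) : k ∈ pvD p ↔ k ∈ p.map pvKey := by
  unfold pvD PySem.List.dedup
  exact PySem.Set.mem_ofList _ _

theorem pv_D_append (p : List (List Char)) (s : List Char) :
    pvD (p ++ [s]) = if pvKey s ∈ pvD p then pvD p else pvD p ++ [pvKey s] := by
  unfold pvD
  rw [List.map_append, List.map_cons, List.map_nil, pv_dedup_append]

theorem pv_nodup_D (p : List (List Char)) : (pvD p).Nodup := PySem.Set.nodup_ofList _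

theorem pv_key_lower (w : List Char) : pvKey (PySem.Chars.lower w) = pvKey w := by
  simp [pvKey, PySem.Chars.lower]

theorem pv_F_append (p : List (List Char)) (s : List Char) (L : Int) :
    pvF (p ++ [s]) L = pvF p L ++ (if pvKey s = L then [PySem.Chars.lower s] else []) := by
  unfold pvF
  rw [List.map_append, List.filter_append]
  congr 1
  simp only [List.map_cons, List.map_nil, List.filter_cons, List.filter_nil, pv_key_lower]
  by_cases h : pvKey s = L <;> simp [h]

theorem pv_F_fresh (p : List (List Char)) (k : Int) (h : k ∉ pvD p) : pvF p k = [] := by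
  unfold pvF
  rw [List.filter_eq_nil_iff]
  intro w hw
  obtain ⟨u, hu, rfl⟩ := List.mem_map.mp hw
  simp only [beq_iff_eq, pv_key_lower]
  intro hk
  exact h ((pv_mem_D_iff p k).mpr (hk ▸ List.mem_map_of_mem hu))

theorem pv_phase1' (p : List (List Char)) :
    p.foldl arrangeWordsStep ([], PySem.Dict.empty) = (pvB p, pvM p) := by
  induction p using List.reverseRecOn with
  | nil => rfl
  | append_singleton p s ih =>
    rw [List.foldl_append, List.foldl_cons, List.foldl_nil, ih]
    have hnd := pv_nodup_D p
    set k := pvKey s with hkdef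
    have hcurr : ((s.length : Nat) : Int) = k := by simp [hkdef, pvKey]
    by_cases hk : k ∈ pvD p
    · -- existing length class
      have hidx : (pvD p).idxOf k < (pvD p).length := List.idxOf_lt_length_of_mem hk
      have hcont : (pvM p).contains k = true := by rw [pvM, pv_contains]; simpa using hk
      have hD' : pvD (p ++ [s]) = pvD p := by rw [pv_D_append, ← hkdef, if_pos hk]
      have hgetD : (pvM p).getD k 0 = (((pvD p).idxOf k : Nat) : Int) := by
        rw [pvM, pv_getD _ _ _ hnd hk]; simp
      have hlst : PySem.List.pyGetD (pvB p) ((pvM p).getD k 0) [] = pvF p k := by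
        rw [hgetD, PySem.List.pyGetD_eq_getElem _ _ (by positivity) (by simpa [pvB] using hidx)]
        simp only [Int.toNat_natCast, pvB]
        rw [List.getElem_map, List.getElem_idxOf hidx]
      have hset : (pvB p).set ((pvD p).idxOf k) (pvF p k ++ [PySem.Chars.lower s]) =
          pvB (p ++ [s]) := by
        apply List.ext_getElem
        · simp [pvB, hD']
        · intro j h1 h2
          have hj : j < (pvD p).length := by simpa [pvB, hD'] using h2
          rw [List.getElem_set]
          simp only [pvB, hD', List.getElem_map]
          rw [pv_F_append, ← hkdef]
          by_cases hjk : (pvD p).idxOf k = j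
          · subst hjk
            rw [List.getElem_idxOf hidx, if_pos rfl, if_pos rfl]
          · have hne : ¬ (k = (pvD p)[j]) := by
              intro h
              apply hjk
              have hgj : (pvD p)[(pvD p).idxOf k]'hidx = (pvD p)[j] := by
                rw [List.getElem_idxOf hidx]; exact h
              exact (List.Nodup.getElem_inj_iff hnd).mp hgj
            rw [if_neg hjk, if_neg hne, List.append_nil]
      have hM' : pvM (p ++ [s]) = pvM p := by rw [pvM, pvM, hD']
      simp only [arrangeWordsStep, hcurr, hcont, if_true]
      rw [hlst, hM', ← hset, hgetD, Int.toNat_natCast]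
      by_cases hne : pvF p k = []
      · simp [hne]
      · simp [hne]
    · -- new length class
      have hcont : (pvM p).contains k = false := by
        rw [pvM, pv_contains]; simpa using hk
      have hD' : pvD (p ++ [s]) = pvD p ++ [k] := by rw [pv_D_append, ← hkdef, if_neg hk]
      have hnd' : (pvD p ++ [k]).Nodup := by rw [← hD']; exact pv_nodup_D _
      have hlen : (pvB p).length = (pvD p).length := by simp [pvB]
      have hMnew : (pvM p).insert k ((pvB p).length : Int) = pvM (p ++ [s]) := by
        rw [pvM, pv_insert_fresh _ _ _ hcont, pvM, hD', pv_pairs_append]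
        simp [hlen]
      have hidxOf : (pvD p ++ [k]).idxOf k = (pvD p).length := by
        rw [List.idxOf_append_of_notMem hk]; simp
      have hgetD : (pvM (p ++ [s])).getD k 0 = (((pvB p).length : Nat) : Int) := by
        rw [pvM, hD', pv_getD _ _ _ hnd' (by simp), hidxOf]; simp [hlen]
      have hlst : PySem.List.pyGetD (pvB p ++ [[]]) ((pvM (p ++ [s])).getD k 0) [] =
          ([] : List (List Char)) := by
        rw [hgetD, PySem.List.pyGetD_eq_getElem _ _ (by positivity) (by simp)]
        simp
      have hset : (pvB p ++ [[]]).set (pvB p).length [PySem.Chars.lower s] =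
          pvB p ++ [[PySem.Chars.lower s]] := by
        rw [List.set_append, if_neg (lt_irrefl _)]
        simp
      have hBnew : pvB p ++ [[PySem.Chars.lower s]] = pvB (p ++ [s]) := by
        unfold pvB
        rw [hD', List.map_append, List.map_cons, List.map_nil]
        congr 1
        · apply List.map_congr_left
          intro L hL
          rw [pv_F_append, ← hkdef, if_neg (fun h => hk (by rw [h]; exact hL)), List.append_nil]
        · rw [pv_F_append, ← hkdef, if_pos rfl, pv_F_fresh _ _ hk, List.nil_append]
      simp only [arrangeWordsStep, hcurr, hcont, Bool.false_eq_true, if_false]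
      rw [hMnew, hlst]
      simp only [ne_eq, not_true_eq_false, if_false]
      rw [hgetD, Int.toNat_natCast, hset, hBnew]

theorem pv_pairs_eq_map_aux (D : List Int) (n : Nat) (hnd : D.Nodup) :
    pvPairs D n = D.map (fun L => (L, ((n + D.idxOf L : Nat) : Int))) := by
  induction D generalizing n with
  | nil => rfl
  | cons d D ih =>
    have hd : d ∉ D := (List.nodup_cons.mp hnd).1
    simp only [pvPairs, ih (n + 1) (List.nodup_cons.mp hnd).2, List.map_cons, List.idxOf_cons_self]
    congr 1
    apply List.map_congr_left
    intro L hL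
    have hne : d ≠ L := fun h => hd (h ▸ hL)
    rw [List.idxOf_cons_ne (a := L) (b := d) D hne]
    have h2 : n + 1 + List.idxOf L D = n + (List.idxOf L D).succ := by omega
    rw [h2]

theorem pv_keys (p : List (List Char)) :
    (PySem.Dict.ofList (PySem.List.sorted (pvM p).items (fun q => q.1))).keys =
      PySem.List.sorted (pvD p) (fun x => x) := by
  have hnd := pv_nodup_D p
  set SK := PySem.List.sorted (pvD p) (fun x => x) with hSK
  have hSKnd : SK.Nodup := ((PySem.List.sorted_perm (pvD p) _ false).nodup_iff).mpr hnd
  set f : Int → Int × Int := fun L => (L, (((pvD p).idxOf L : Nat) : Int)) with hf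
  have hitems : (pvM p).items = (pvD p).map f := by
    show pvPairs (pvD p) 0 = _
    rw [pv_pairs_eq_map_aux _ 0 hnd]
    simp [hf]
  have hsorted : PySem.List.sorted ((pvD p).map f) (fun q => q.1) = SK.map f := by
    apply PySem.List.sorted_eq_of_perm_of_pairwise_lt
    · exact (PySem.List.sorted_perm (pvD p) _ false).map f
    · rw [List.pairwise_map]
      exact pv_SK_lt _ hnd
  rw [hitems, hsorted]
  show (PySem.Dict.empty.update (SK.map f)).keys = SK
  unfold PySem.Dict.update
  unfold PySem.Dict.keys
  rw [PySem.Dict.items_foldl_insert_fresh (SK.map f) (fun q => q.1) (fun q => q.2)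
    PySem.Dict.empty (fun a _ => PySem.Dict.contains_empty _) ?_]
  · simp [hf, Function.comp_def, PySem.Dict.empty]
  · simpa [hf, Function.comp_def] using hSKnd

theorem pv_lookup (p : List (List Char)) (L : Int) (hL : L ∈ pvD p) :
    PySem.List.pyGetD (pvB p) ((pvM p).getD L 0) [] = pvF p L := by
  have hnd := pv_nodup_D p
  have hidx : (pvD p).idxOf L < (pvD p).length := List.idxOf_lt_length_of_mem hL
  have hgetD : (pvM p).getD L 0 = (((pvD p).idxOf L : Nat) : Int) := by
    rw [pvM, pv_getD _ _ _ hnd hL]; simp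
  rw [hgetD, PySem.List.pyGetD_eq_getElem _ _ (by positivity) (by simpa [pvB] using hidx)]
  simp only [Int.toNat_natCast, pvB]
  rw [List.getElem_map, List.getElem_idxOf hidx]

theorem pv_F_ne_nil (p : List (List Char)) (k : Int) (h : k ∈ pvD p) : pvF p k ≠ [] := by
  obtain ⟨u, hu, huk⟩ := List.mem_map.mp ((pv_mem_D_iff p k).mp h)
  have hmem : PySem.Chars.lower u ∈ pvF p k := by
    unfold pvF
    apply List.mem_filter.mpr
    exact ⟨List.mem_map_of_mem hu, by simp [pv_key_lower, huk]⟩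
  exact List.ne_nil_of_mem hmem

theorem pv_range_emit_tail (capv : List Char) (tl : List (List Char)) (w0 : List Char)
    (out : List Char) :
    (PySem.List.pyRange 1 ((tl.length + 1 : Nat) : Int)).foldl
      (fun out j =>
        if j == 0 then out ++ (capv ++ [' '])
        else out ++ (PySem.List.pyGetD (w0 :: tl) j [] ++ [' '])) out
    = out ++ tl.flatMap (fun w => w ++ [' ']) := by
  induction tl using List.reverseRecOn generalizing out with
  | nil => simp
  | append_singleton tl x ih =>
    have hcast : (((tl ++ [x]).length + 1 : Nat) : Int) = ((tl.length + 1 : Nat) : Int) + 1 := by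
      push_cast [List.length_append, List.length_cons, List.length_nil]; omega
    have hle : (1 : Int) ≤ ((tl.length + 1 : Nat) : Int) := by push_cast; omega
    rw [hcast, PySem.List.pyRange_one_succ_right hle, List.foldl_append,
      List.foldl_cons, List.foldl_nil]
    have hprefix : ∀ (o : List Char),
        (PySem.List.pyRange 1 ((tl.length + 1 : Nat) : Int)).foldl
          (fun out j =>
            if j == 0 then out ++ (capv ++ [' '])
            else out ++ (PySem.List.pyGetD (w0 :: (tl ++ [x])) j [] ++ [' '])) o
        = (PySem.List.pyRange 1 ((tl.length + 1 : Nat) : Int)).foldl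
          (fun out j =>
            if j == 0 then out ++ (capv ++ [' '])
            else out ++ (PySem.List.pyGetD (w0 :: tl) j [] ++ [' '])) o := by
      intro o
      apply PySem.List.foldl_congr_mem
      intro acc j hj
      obtain ⟨hj1, hj2⟩ := PySem.List.mem_pyRange_one.mp hj
      have hj0 : (j == 0) = false := by simp; omega
      rw [hj0]
      simp only [Bool.false_eq_true, if_false]
      have hget : PySem.List.pyGetD (w0 :: (tl ++ [x])) j [] =
          PySem.List.pyGetD (w0 :: tl) j [] := by
        rw [PySem.List.pyGetD_of_nonneg _ _ (by omega), PySem.List.pyGetD_of_nonneg _ _ (by omega)]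
        rw [List.getD_eq_getElem?_getD, List.getD_eq_getElem?_getD]
        have hlt : j.toNat < (w0 :: tl).length := by simp; omega
        rw [show (w0 :: (tl ++ [x])) = (w0 :: tl) ++ [x] from rfl, List.getElem?_append_left hlt]
      rw [hget]
    rw [hprefix, ih]
    have hx : PySem.List.pyGetD (w0 :: (tl ++ [x])) ((tl.length + 1 : Nat) : Int) [] = x := by
      rw [PySem.List.pyGetD_of_nonneg _ _ (by positivity), List.getD_eq_getElem?_getD]
      simp only [Int.toNat_natCast]
      rw [show (w0 :: (tl ++ [x])) = (w0 :: tl) ++ [x] from rfl,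
        show tl.length + 1 = (w0 :: tl).length from rfl, List.getElem?_concat_length]
      rfl
    have h0 : ((((tl.length + 1 : Nat) : Int)) == 0) = false := by
      simp
      omega
    rw [h0]
    simp only [Bool.false_eq_true, if_false]
    rw [hx]
    simp

theorem pv_range_emit (capv : List Char) (w0 : List Char) (tl : List (List Char))
    (out : List Char) :
    (PySem.List.pyRange 0 (((w0 :: tl).length : Nat) : Int)).foldl
      (fun out j =>
        if j == 0 then out ++ (capv ++ [' '])
        else out ++ (PySem.List.pyGetD (w0 :: tl) j [] ++ [' '])) out
    = out ++ ((capv ++ [' ']) ++ tl.flatMap (fun w => w ++ [' '])) := by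
  have hlen : (((w0 :: tl).length : Nat) : Int) = ((tl.length + 1 : Nat) : Int) := by simp
  rw [hlen, PySem.List.pyRange_one_cons (by push_cast; omega), List.foldl_cons]
  have h00 : (((0:Int)) == 0) = true := rfl
  rw [h00, if_pos rfl]
  rw [show (0:Int) + 1 = 1 from rfl, pv_range_emit_tail capv tl w0 _]
  simp

theorem pv_emit_first (p : List (List Char)) (L : Int) (hL : L ∈ pvD p) (v0 : List Char)
    (vt : List (List Char)) (hv : pvF p L = v0 :: vt) (out : List Char) :
    arrangeWordsEmit (pvB p) (pvM p) (out, (0 : Int)) L =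
      (out ++ ((arrangeWordsAltCap v0 ++ [' ']) ++ vt.flatMap (fun w => w ++ [' '])), 1) := by
  simp only [arrangeWordsEmit]
  rw [pv_lookup p L hL, hv]
  have h00 : (((0:Int)) == 0) = true := rfl
  rw [h00, if_pos rfl, pv_range_emit]
  have hget0 : PySem.List.pyGetD (v0 :: vt) 0 [] = v0 := by
    rw [PySem.List.pyGetD_of_nonneg _ _ le_rfl]
    rfl
  rw [hget0]
  cases v0 <;> rfl

theorem pv_emit_rest (p : List (List Char)) (ks : List Int) (hks : ∀ L ∈ ks, L ∈ pvD p)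
    (out : List Char) (c : Int) (hc : 0 < c) :
    ks.foldl (arrangeWordsEmit (pvB p) (pvM p)) (out, c) =
      (out ++ ks.flatMap (fun L => (pvF p L).flatMap (fun w => w ++ [' '])), c + ks.length) := by
  induction ks generalizing out c with
  | nil => simp
  | cons L ks ih =>
    rw [List.foldl_cons]
    have hL := hks L (by simp)
    have hstep : arrangeWordsEmit (pvB p) (pvM p) (out, c) L =
        (out ++ (pvF p L).flatMap (fun w => w ++ [' ']), c + 1) := by
      simp only [arrangeWordsEmit]
      have hc0 : (c == 0) = false := by simp; omega
      rw [hc0]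
      simp only [Bool.false_eq_true, if_false]
      rw [pv_lookup p L hL, PySem.List.foldl_append_eq_flatMap]
    rw [hstep, ih (fun L h => hks L (by simp [h])) _ (c + 1) (by omega)]
    refine Prod.ext ?_ ?_
    · simp [List.flatMap_cons]
    · simp
      omega

theorem pv_flat_dropLast (l : List (List Char)) (h : l ≠ []) :
    (l.flatMap (fun w => w ++ [' '])).dropLast = PySem.Chars.join [' '] l := by
  induction l with
  | nil => exact absurd rfl h
  | cons w l ih =>
    cases l with
    | nil => simp [PySem.Chars.join_singleton]
    | cons w' l' =>
      rw [List.flatMap_cons, PySem.Chars.join_cons_cons]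
      have hne : (w' :: l').flatMap (fun w => w ++ [' ']) ≠ [] := by simp
      rw [List.dropLast_append_of_ne_nil hne, ih (by simp)]

theorem pv_main (text : String) : arrangeWords text = arrangeWords_alt text := by
  simp only [arrangeWords, arrangeWords_alt]
  set ws := PySem.Chars.split₀ text.toList with hws
  rw [pv_phase1' ws, pv_keys ws]
  have hkey : (fun (w : List Char) => ((w.length : Nat) : Int)) = pvKey := rfl
  rw [hkey, pv_sorted_eq_flatMap_groups (ws.map PySem.Chars.lower) pvKey]
  have hmapkey : (ws.map PySem.Chars.lower).map pvKey = ws.map pvKey := by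
    rw [List.map_map]
    exact List.map_congr_left (fun w _ => pv_key_lower w)
  have hD : PySem.List.dedup ((ws.map PySem.Chars.lower).map pvKey) = pvD ws := by
    rw [hmapkey]; rfl
  rw [hD]
  have hFilt : (fun k => (ws.map PySem.Chars.lower).filter (fun w => pvKey w == k)) = pvF ws := rfl
  rw [hFilt]
  by_cases hwsnil : ws = []
  · rw [hwsnil]
    simp [pvB, pvM, pvD, pvPairs, PySem.List.dedup, PySem.Set.ofList, PySem.Set.empty]
    rfl
  · have hDne : pvD ws ≠ [] := by
      intro h
      obtain ⟨u, us, hc⟩ := List.exists_cons_of_ne_nil hwsnil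
      have hm : pvKey u ∈ pvD ws := (pv_mem_D_iff _ _).mpr (by rw [hc]; simp)
      rw [h] at hm
      cases hm
    have hSKne : PySem.List.sorted (pvD ws) (fun x => x) ≠ [] :=
      fun h => hDne ((PySem.List.sorted_eq_nil_iff _ _ _).mp h)
    obtain ⟨k0, krest, hSKeq⟩ := List.exists_cons_of_ne_nil hSKne
    have hk0 : k0 ∈ pvD ws := by
      have : k0 ∈ PySem.List.sorted (pvD ws) (fun x => x) := by rw [hSKeq]; simp
      exact (PySem.List.mem_sorted _ _ _ _).mp this
    obtain ⟨v0, vt, hv⟩ := List.exists_cons_of_ne_nil (pv_F_ne_nil ws k0 hk0)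
    have hrest : ∀ L ∈ krest, L ∈ pvD ws := by
      intro L h
      have : L ∈ PySem.List.sorted (pvD ws) (fun x => x) := by rw [hSKeq]; simp [h]
      exact (PySem.List.mem_sorted _ _ _ _).mp this
    rw [hSKeq, List.foldl_cons, pv_emit_first ws k0 hk0 v0 vt hv [],
      pv_emit_rest ws krest hrest _ 1 one_pos]
    rw [List.flatMap_cons, hv, List.cons_append]
    have hflat : ([] ++ ((arrangeWordsAltCap v0 ++ [' ']) ++ vt.flatMap (fun w => w ++ [' ']))) ++
        krest.flatMap (fun L => (pvF ws L).flatMap (fun w => w ++ [' '])) =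
        (arrangeWordsAltCap v0 :: (vt ++ krest.flatMap (pvF ws))).flatMap
          (fun w => w ++ [' ']) := by
      simp [List.flatMap_cons, List.flatMap_append, List.flatMap_assoc]
    rw [hflat, PySem.List.slice_to_neg_one, pv_flat_dropLast _ (by simp)]
-- ===== VERDICT (by name: the statement is the Claim_ definition above) =====
theorem arrangeWords_spec : Claim_equal_arrangeWords := by
  intro text _
  unfold Spec_arrangeWords
  exact pv_main text
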